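-- pv_equiv track=rewrite | github.com/sofiandread/sp_detail_check | app.py | majority3x3
-- ===== SOURCE A (Python) =====
-- def majority3x3(ink, w, h):
--     out = [0] * (w * h)
--     for y in range(h):
--         for x in range(w):
--             s = 0
--             for yy in (y - 1, y, y + 1):
--                 if 0 <= yy < h:
--                     base = yy * w
--                     for xx in (x - 1, x, x + 1):
--                         if 0 <= xx < w:
--                             s += ink[base + xx]
--             out[y * w + x] = 1 if s >= 5 else 0
--     return out
-- ===== SOURCE B (Python) =====
-- def majority3x3(ink, w, h):
--     # Separable filter: per row, a vertical 3-sum column list, then a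
--     # horizontal sliding 3-sum over it.  Returns [] for non-positive
--     # dimensions (A accidentally returns w*h zeros when both are negative).
--     if w <= 0 or h <= 0:
--         return []
--     out = []
--     for y in range(h):
--         up = (y - 1) * w
--         mid = y * w
--         dn = (y + 1) * w
--         col = [(ink[up + x] if y > 0 else 0)
--                + ink[mid + x]
--                + (ink[dn + x] if y + 1 < h else 0)
--                for x in range(w)]
--         for x in range(w):
--             s = col[x]
--             if x > 0:
--                 s += col[x - 1]
--             if x + 1 < w:
--                 s += col[x + 1]
--             out.append(1 if s >= 5 else 0)
--     return out
-- ===== Notes on version B (the rewrite author's own statement) =====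
-- stated objective: alternative
-- what changed: Replaces A's per-pixel 9-neighbor double scan with a separable filter: one vertical 3-sum column list per row, then a horizontal sliding 3-sum with threshold; non-positive dimensions return [] directly.
-- intended difference: When w<0 and h<0 (so w*h>0), A returns a list of w*h zeros for a nonsensical negative-size image as an artefact of [0]*(w*h); B returns the empty image, the intended value for non-positive dimensions. — e.g. on majority3x3([], -1, -1): A returns [0], B returns []
import Mathlib
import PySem

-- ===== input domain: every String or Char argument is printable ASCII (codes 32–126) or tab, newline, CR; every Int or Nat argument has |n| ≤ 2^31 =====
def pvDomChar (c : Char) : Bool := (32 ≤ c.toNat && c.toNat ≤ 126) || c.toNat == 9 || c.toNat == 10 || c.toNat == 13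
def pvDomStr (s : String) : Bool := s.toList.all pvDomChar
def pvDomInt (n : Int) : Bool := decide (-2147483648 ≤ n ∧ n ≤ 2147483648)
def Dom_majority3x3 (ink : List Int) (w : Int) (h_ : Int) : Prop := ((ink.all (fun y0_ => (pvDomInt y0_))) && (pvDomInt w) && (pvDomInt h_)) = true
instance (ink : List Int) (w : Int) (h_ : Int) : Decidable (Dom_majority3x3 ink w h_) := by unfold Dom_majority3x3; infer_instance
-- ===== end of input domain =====

-- B replaces A's per-pixel 9-neighbour scan with a separable filter (vertical 3-sum row, then
-- horizontal sliding 3-sum); same cost class, different decomposition (objective: alternative).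

-- ===== PORT A =====
-- ink[i]: all indices A reaches are guarded into [0, w*h); where Python would raise
-- (ink shorter than w*h) pyGetD returns the default — those inputs are outside Pre_.
def pvInkAt (xs : List Int) (i : Int) : Int := PySem.List.pyGetD xs i 0

-- the inner `s` accumulation of A: loops over the literal tuples (y-1,y,y+1) and (x-1,x,x+1)
def pvSumA (ink : List Int) (w : Int) (h_ : Int) (x y : Int) : Int :=
  [y - 1, y, y + 1].foldl (fun s yy =>
    if 0 ≤ yy ∧ yy < h_ then
      let base := yy * w
      [x - 1, x, x + 1].foldl (fun s xx =>
        if 0 ≤ xx ∧ xx < w then s + pvInkAt ink (base + xx) else s) s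
    else s) 0

def majority3x3 (ink : List Int) (w : Int) (h_ : Int) : List Int :=
  (PySem.List.pyRange 0 h_ 1).foldl (fun out y =>
    (PySem.List.pyRange 0 w 1).foldl (fun out x =>
      out.set (y * w + x).toNat (if 5 ≤ pvSumA ink w h_ x y then 1 else 0)) out)
    (List.replicate (w * h_).toNat 0)

-- ===== PORT B =====
-- the vertical 3-sum column list of row y (B's list comprehension `col`)
def pvCol (ink : List Int) (w : Int) (h_ : Int) (y : Int) : List Int :=
  (PySem.List.pyRange 0 w 1).map (fun x =>
    (if 0 < y then pvInkAt ink ((y - 1) * w + x) else 0)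
    + pvInkAt ink (y * w + x)
    + (if y + 1 < h_ then pvInkAt ink ((y + 1) * w + x) else 0))

-- B's horizontal sliding 3-sum over `col`
def pvSumB (col : List Int) (w : Int) (x : Int) : Int :=
  let s := pvInkAt col x
  let s := if 0 < x then s + pvInkAt col (x - 1) else s
  if x + 1 < w then s + pvInkAt col (x + 1) else s

def majority3x3_alt (ink : List Int) (w : Int) (h_ : Int) : List Int :=
  if w ≤ 0 ∨ h_ ≤ 0 then [] else
  (PySem.List.pyRange 0 h_ 1).foldl (fun out y =>
    let col := pvCol ink w h_ y
    (PySem.List.pyRange 0 w 1).foldl (fun out x =>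
      out ++ [if 5 ≤ pvSumB col w x then 1 else 0]) out) []

-- ===== PRECONDITION & SPEC =====
-- Pre_ excludes exactly the inputs where Python A raises IndexError: a positive-size
-- image whose ink list is shorter than w*h.
def Pre_majority3x3 (ink : List Int) (w : Int) (h_ : Int) : Prop :=
  0 < w → 0 < h_ → w * h_ ≤ (ink.length : Int)
instance (ink : List Int) (w : Int) (h_ : Int) : Decidable (Pre_majority3x3 ink w h_) := by
  unfold Pre_majority3x3; infer_instance

def pvWitness_majority3x3 : List Int × Int × Int := ([1, 2, 0, 3, 1, 0], 3, 2)

-- When w<0 and h<0 (so w*h>0), A returns a list of w*h zeros for a nonsensical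
-- negative-size image as an artefact of [0]*(w*h); B returns the empty image,
-- the intended value for non-positive dimensions.
def D_majority3x3 (ink : List Int) (w : Int) (h_ : Int) : Prop := w < 0 ∧ h_ < 0
instance (ink : List Int) (w : Int) (h_ : Int) : Decidable (D_majority3x3 ink w h_) := by
  unfold D_majority3x3; infer_instance

def Spec_majority3x3 (ink : List Int) (w : Int) (h_ : Int) (out : List Int) : Prop :=
  ¬ D_majority3x3 ink w h_ → out = majority3x3_alt ink w h_
instance (ink : List Int) (w : Int) (h_ : Int) (out : List Int) : Decidable (Spec_majority3x3 ink w h_ out) := by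
  unfold Spec_majority3x3; infer_instance

def pvDiffWitness_majority3x3 : List Int × Int × Int := ([], -1, -1)
def pvDiffWitnessOut_majority3x3 : (List Int) × (List Int) := ([0], [])

-- ===== CLAIM (what is proved, stated in full; the proofs are below) =====
def Claim_unchanged_majority3x3 : Prop := ∀ (ink : List Int) (w : Int) (h_ : Int), Dom_majority3x3 ink w h_ → Pre_majority3x3 ink w h_ → Spec_majority3x3 ink w h_ (majority3x3 ink w h_)
def Claim_changed_majority3x3 : Prop := Dom_majority3x3 (pvDiffWitness_majority3x3.1) (pvDiffWitness_majority3x3.2.1) (pvDiffWitness_majority3x3.2.2) ∧ Pre_majority3x3 (pvDiffWitness_majority3x3.1) (pvDiffWitness_majority3x3.2.1) (pvDiffWitness_majority3x3.2.2) ∧ D_majority3x3 (pvDiffWitness_majority3x3.1) (pvDiffWitness_majority3x3.2.1) (pvDiffWitness_majority3x3.2.2) ∧ majority3x3 (pvDiffWitness_majority3x3.1) (pvDiffWitness_majority3x3.2.1) (pvDiffWitness_majority3x3.2.2) = pvDiffWitnessOut_majority3x3.1 ∧ majority3x3_alt (pvDiffWitness_majority3x3.1) (pvDiffWitness_majority3x3.2.1)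 (pvDiffWitness_majority3x3.2.2) = pvDiffWitnessOut_majority3x3.2 ∧ pvDiffWitnessOut_majority3x3.1 ≠ pvDiffWitnessOut_majority3x3.2
def Claim_exact_majority3x3 : Prop := ∀ (ink : List Int) (w : Int) (h_ : Int), Dom_majority3x3 ink w h_ → Pre_majority3x3 ink w h_ → D_majority3x3 ink w h_ → majority3x3 ink w h_ ≠ majority3x3_alt ink w h_

-- ===== LEMMAS AND PROOFS =====

-- overwrite the head of the middle part
theorem pvSetMid (pre : List Int) (v a : Int) (rest : List Int) :
    (pre ++ v :: rest).set pre.length a = pre ++ a :: rest := by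
  induction pre with
  | nil => rfl
  | cons p ps ih => simpa [List.set] using ih

-- an in-order fold of `set`s at offsets pre.length+0 … pre.length+m-1 rewrites the middle slice
theorem pvSetFold :
    ∀ (m : ℕ) (g : ℕ → Int) (pre mid suf : List Int), mid.length = m →
      (List.range m).foldl (fun o x => o.set (pre.length + x) (g x)) (pre ++ (mid ++ suf))
        = pre ++ ((List.range m).map g ++ suf) := by
  intro m
  induction m with
  | zero => intro g pre mid suf hm; simp [List.length_eq_zero_iff.mp hm]
  | succ m ih =>
    intro g pre mid suf hm
    cases mid with
    | nil => simp at hm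
    | cons v mid' =>
      rw [List.range_succ_eq_map]
      simp only [List.foldl_cons, List.foldl_map]
      rw [show (pre ++ (v :: mid' ++ suf)).set (pre.length + 0) (g 0)
            = (pre ++ [g 0]) ++ (mid' ++ suf) by
            simpa using pvSetMid pre v (g 0) (mid' ++ suf)]
      have hstep := ih (fun x => g (x + 1)) (pre ++ [g 0]) mid' suf (by simpa using hm)
      simp only [List.length_append, List.length_cons, List.length_nil] at hstep ⊢
      rw [show (fun (o : List Int) (x : ℕ) => o.set (pre.length + Nat.succ x) (g (Nat.succ x)))
            = (fun (o : List Int) (x : ℕ) => o.set (pre.length + 1 + x) ((fun t => g (t+1)) x)) by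
            funext o x; congr 1; omega]
      rw [hstep]
      simp [List.range_succ_eq_map, List.map_map, Function.comp]

-- the outer row loop on a zero-filled buffer produces the concatenation of the rows
theorem pvRowsFold (wn : ℕ) :
    ∀ (m : ℕ) (v : ℕ → ℕ → Int) (pre : List Int),
      (List.range m).foldl (fun out y =>
          (List.range wn).foldl (fun o x => o.set (pre.length + (y * wn + x)) (v y x)) out)
        (pre ++ List.replicate (m * wn) (0 : Int))
      = pre ++ (List.range m).flatMap (fun y => (List.range wn).map (v y)) := by
  intro m
  induction m with
  | zero => intro v pre; simp
  | succ m ih =>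
    intro v pre
    rw [List.range_succ_eq_map]
    simp only [List.foldl_cons, List.foldl_map]
    have hsplit : List.replicate ((m + 1) * wn) (0 : Int)
        = List.replicate wn 0 ++ List.replicate (m * wn) 0 := by
      rw [List.replicate_append_replicate]; congr 1; ring
    rw [hsplit]
    have h0 : (List.range wn).foldl (fun o x => o.set (pre.length + (0 * wn + x)) (v 0 x))
          (pre ++ (List.replicate wn 0 ++ List.replicate (m * wn) 0))
        = pre ++ ((List.range wn).map (v 0) ++ List.replicate (m * wn) 0) := by
      rw [show (fun (o : List Int) (x : ℕ) => o.set (pre.length + (0 * wn + x)) (v 0 x))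
            = (fun (o : List Int) (x : ℕ) => o.set (pre.length + x) (v 0 x)) by
            funext o x; congr 1; omega]
      exact pvSetFold wn (v 0) pre (List.replicate wn 0) (List.replicate (m * wn) 0) (by simp)
    rw [h0, show pre ++ ((List.range wn).map (v 0) ++ List.replicate (m * wn) 0)
          = (pre ++ (List.range wn).map (v 0)) ++ List.replicate (m * wn) 0 by simp]
    have hstep := ih (fun a b => v (a + 1) b) (pre ++ (List.range wn).map (v 0))
    rw [show (fun (out : List Int) (y : ℕ) =>
            (List.range wn).foldl (fun o x => o.set (pre.length + (Nat.succ y * wn + x)) (v (Nat.succ y) x)) out)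
          = (fun (out : List Int) (y : ℕ) =>
            (List.range wn).foldl
              (fun o x => o.set ((pre ++ (List.range wn).map (v 0)).length + (y * wn + x))
                ((fun a b => v (a+1) b) y x)) out) by
          funext out y; congr 1; funext o x; congr 1; · simp; ring]
    rw [hstep]
    simp [List.flatMap_map]

-- Nat-indexed pixel values of the two ports
def pvValA (ink : List Int) (wn hn : ℕ) (y x : ℕ) : Int :=
  if 5 ≤ pvSumA ink (wn : Int) (hn : Int) (x : ℕ) (y : ℕ) then 1 else 0
def pvValB (ink : List Int) (wn hn : ℕ) (y x : ℕ) : Int :=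
  if 5 ≤ pvSumB (pvCol ink (wn : Int) (hn : Int) (y : ℕ)) (wn : Int) (x : ℕ) then 1 else 0

-- the two per-pixel sums agree inside the image
set_option maxHeartbeats 1000000 in
theorem pvPixel (ink : List Int) (wn hn y x : ℕ) (hy : y < hn) (hx : x < wn) :
    pvSumA ink (wn : Int) (hn : Int) (x : ℕ) (y : ℕ)
      = pvSumB (pvCol ink (wn : Int) (hn : Int) (y : ℕ)) (wn : Int) (x : ℕ) := by
  have hcolN : ∀ k : ℕ, k < wn → pvInkAt (pvCol ink (wn : Int) (hn : Int) (y : ℕ)) (k : ℕ) =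
      (if 0 < (y : Int) then pvInkAt ink (((y : Int) - 1) * (wn : Int) + (k : ℕ)) else 0)
      + pvInkAt ink ((y : Int) * (wn : Int) + (k : ℕ))
      + (if (y : Int) + 1 < (hn : Int) then pvInkAt ink (((y : Int) + 1) * (wn : Int) + (k : ℕ)) else 0) := by
    intro k hk
    unfold pvCol
    show PySem.List.pyGetD _ _ _ = _
    rw [PySem.List.pyGetD_map_pyRange _ wn k 0 hk]
  have hcol : ∀ i : Int, 0 ≤ i → i < (wn : Int) →
      pvInkAt (pvCol ink (wn : Int) (hn : Int) (y : ℕ)) i =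
      (if 0 < (y : Int) then pvInkAt ink (((y : Int) - 1) * (wn : Int) + i) else 0)
      + pvInkAt ink ((y : Int) * (wn : Int) + i)
      + (if (y : Int) + 1 < (hn : Int) then pvInkAt ink (((y : Int) + 1) * (wn : Int) + i) else 0) := by
    intro i h0 h1
    obtain ⟨k, rfl⟩ : ∃ k : ℕ, i = (k : Int) := ⟨i.toNat, by omega⟩
    exact hcolN k (by exact_mod_cast h1)
  have gY1 : ((0 : Int) ≤ ((y : ℕ) : Int) - 1 ∧ ((y : ℕ) : Int) - 1 < (hn : Int)) = (0 < ((y : ℕ) : Int)) := by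
    rw [eq_iff_iff]; omega
  have gY2 : ((0 : Int) ≤ ((y : ℕ) : Int) ∧ ((y : ℕ) : Int) < (hn : Int)) = True := by
    rw [eq_iff_iff, iff_true]; omega
  have gY3 : ((0 : Int) ≤ ((y : ℕ) : Int) + 1 ∧ ((y : ℕ) : Int) + 1 < (hn : Int)) = (((y : ℕ) : Int) + 1 < (hn : Int)) := by
    rw [eq_iff_iff]; omega
  have gX1 : ((0 : Int) ≤ ((x : ℕ) : Int) - 1 ∧ ((x : ℕ) : Int) - 1 < (wn : Int)) = (0 < ((x : ℕ) : Int)) := by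
    rw [eq_iff_iff]; omega
  have gX2 : ((0 : Int) ≤ ((x : ℕ) : Int) ∧ ((x : ℕ) : Int) < (wn : Int)) = True := by
    rw [eq_iff_iff, iff_true]; omega
  have gX3 : ((0 : Int) ≤ ((x : ℕ) : Int) + 1 ∧ ((x : ℕ) : Int) + 1 < (wn : Int)) = (((x : ℕ) : Int) + 1 < (wn : Int)) := by
    rw [eq_iff_iff]; omega
  simp only [pvSumA, pvSumB, List.foldl_cons, List.foldl_nil]
  simp only [gY1, gY2, gY3, gX1, gX2, gX3, ite_true]
  by_cases hx0 : (0 : Int) < ((x : ℕ) : Int)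
  · by_cases hx1 : ((x : ℕ) : Int) + 1 < (wn : Int)
    · simp only [hx0, hx1, ite_true]
      rw [hcol ((x : ℕ) : Int) (by positivity) (by exact_mod_cast hx),
        hcol (((x : ℕ) : Int) - 1) (by omega) (by omega),
        hcol (((x : ℕ) : Int) + 1) (by omega) hx1]
      split_ifs <;> ring
    · simp only [hx0, hx1, ite_true, ite_false]
      rw [hcol ((x : ℕ) : Int) (by positivity) (by exact_mod_cast hx),
        hcol (((x : ℕ) : Int) - 1) (by omega) (by omega)]
      split_ifs <;> ring
  · by_cases hx1 : ((x : ℕ) : Int) + 1 < (wn : Int)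
    · simp only [hx0, hx1, ite_true, ite_false]
      rw [hcol ((x : ℕ) : Int) (by positivity) (by exact_mod_cast hx),
        hcol (((x : ℕ) : Int) + 1) (by omega) hx1]
      split_ifs <;> ring
    · simp only [hx0, hx1, ite_false]
      rw [hcol ((x : ℕ) : Int) (by positivity) (by exact_mod_cast hx)]
      split_ifs <;> ring

-- final corner: A collapses to the zero buffer when either range is empty
theorem pvA_degenerate (ink : List Int) (w h_ : Int) (h : w ≤ 0 ∨ h_ ≤ 0) :
    majority3x3 ink w h_ = List.replicate (w * h_).toNat 0 := by
  unfold majority3x3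
  rcases h with h | h
  · have : PySem.List.pyRange 0 w 1 = [] := PySem.List.pyRange_one_eq_nil (by omega)
    simp [this, List.foldl_fixed]
  · have : PySem.List.pyRange 0 h_ 1 = [] := PySem.List.pyRange_one_eq_nil (by omega)
    simp [this]

-- main case: both ports equal the row concatenation
set_option maxHeartbeats 1000000 in
theorem pvMain (ink : List Int) (w h_ : Int) (hw : 0 < w) (hh : 0 < h_) :
    majority3x3 ink w h_ = majority3x3_alt ink w h_ := by
  obtain ⟨wn, rfl⟩ : ∃ n : ℕ, w = (n : Int) := ⟨w.toNat, by omega⟩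
  obtain ⟨hn, rfl⟩ : ∃ n : ℕ, h_ = (n : Int) := ⟨h_.toNat, by omega⟩
  -- A side: Nat-indexed double fold of sets on the zero buffer, then pvRowsFold
  unfold majority3x3
  rw [PySem.List.pyRange_zero_nat hn, PySem.List.pyRange_zero_nat wn]
  simp only [List.foldl_map]
  rw [show ((wn : Int) * (hn : Int)).toNat = hn * wn by
        rw [show ((wn : Int) * (hn : Int)) = ((hn * wn : ℕ) : Int) by push_cast; ring,
          Int.toNat_natCast]]
  rw [show (fun (out : List Int) (y : ℕ) =>
          (List.range wn).foldl (fun out x =>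
            out.set (((y : ℕ) : Int) * (wn : Int) + ((x : ℕ) : Int)).toNat
              (if 5 ≤ pvSumA ink (wn : Int) (hn : Int) ((x : ℕ) : Int) ((y : ℕ) : Int) then 1 else 0)) out)
        = (fun (out : List Int) (y : ℕ) =>
          (List.range wn).foldl (fun o x =>
            o.set (([] : List Int).length + (y * wn + x))
              ((fun (a b : ℕ) =>
                (if 5 ≤ pvSumA ink (wn : Int) (hn : Int) ((b : ℕ) : Int) ((a : ℕ) : Int) then (1:Int) else 0)) y x)) out) by
        funext out y; congr 1; funext o x; congr 1
        rw [show (((y : ℕ) : Int) * (wn : Int) + ((x : ℕ) : Int)) = ((y * wn + x : ℕ) : Int) by push_cast; ring,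
          Int.toNat_natCast]
        simp]
  rw [show (List.replicate (hn * wn) (0 : Int)) = [] ++ List.replicate (hn * wn) (0 : Int) by simp]
  rw [pvRowsFold wn hn
        (fun (a b : ℕ) => (if 5 ≤ pvSumA ink (wn : Int) (hn : Int) ((b : ℕ) : Int) ((a : ℕ) : Int) then (1:Int) else 0)) []]
  -- B side: the append folds are the row maps, concatenated
  unfold majority3x3_alt
  rw [if_neg (by omega : ¬((wn : Int) ≤ 0 ∨ (hn : Int) ≤ 0))]
  simp only [PySem.List.foldl_append_singleton_eq_map]
  rw [PySem.List.foldl_append_eq_flatMap]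
  rw [PySem.List.pyRange_zero_nat hn, PySem.List.pyRange_zero_nat wn]
  simp only [List.flatMap_map, List.map_map, List.nil_append]
  -- pixel-wise agreement
  refine List.flatMap_congr ?_
  intro y hy
  refine List.map_congr_left ?_
  intro x hx
  simp only [Function.comp]
  rw [pvPixel ink wn hn y x (List.mem_range.mp hy) (List.mem_range.mp hx)]

-- ===== VERDICT (by name: the statement is the Claim_ definition above) =====
theorem majority3x3_spec : Claim_unchanged_majority3x3 := by
  intro ink w h_ _ _
  unfold Spec_majority3x3
  intro hnd
  by_cases hw : 0 < w
  · by_cases hh : 0 < h_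
    · exact pvMain ink w h_ hw hh
    · rw [pvA_degenerate ink w h_ (Or.inr (by omega))]
      unfold majority3x3_alt
      rw [if_pos (Or.inr (by omega))]
      unfold D_majority3x3 at hnd
      have : (w * h_).toNat = 0 := by
        have : w * h_ ≤ 0 := mul_nonpos_of_nonneg_of_nonpos (by omega) (by omega)
        omega
      simp [this]
  · rw [pvA_degenerate ink w h_ (Or.inl (by omega))]
    unfold majority3x3_alt
    rw [if_pos (Or.inl (by omega))]
    unfold D_majority3x3 at hnd
    have : (w * h_).toNat = 0 := by
      rcases lt_trichotomy h_ 0 with hc | hc | hc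
      · have hw0 : w = 0 := by omega
        simp [hw0]
      · simp [hc]
      · have : w * h_ ≤ 0 := mul_nonpos_of_nonpos_of_nonneg (by omega) (by omega)
        omega
    simp [this]

theorem majority3x3_changed : Claim_changed_majority3x3 := by
  unfold Claim_changed_majority3x3; decide

theorem majority3x3_tight : Claim_exact_majority3x3 := by
  intro ink w h_ _ _ hD
  obtain ⟨hw, hh⟩ := hD
  rw [pvA_degenerate ink w h_ (Or.inl (by omega))]
  unfold majority3x3_alt
  rw [if_pos (Or.inl (by omega))]
  have hpos : 0 < w * h_ := mul_pos_of_neg_of_neg hw hh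
  intro hcontra
  have := congrArg List.length hcontra
  simp at this
  omega
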